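-- pv_equiv track=rewrite | github.com/thumbe12856/competitive-programming | AA/L1/factor1/solve.py | solve
-- ===== SOURCE A (Python) =====
-- from collections import defaultdict
--
-- def solve(X, Y):
--     ans = 0
--     cnt = defaultdict(lambda: 1)
--
--     for i in range(2, Y + 1, 1):
--         for j in range(i, Y + 1, i):
--             cnt[j] += 1
--
--     for i in range(X, Y + 1, 1):
--         ans += cnt[i]
--
--     return ans
-- ===== SOURCE B (Python) =====
-- def solve(X, Y):
--     # counting formula: for each potential divisor i, add the number of its
--     # multiples lying in [X, Y]; plus one for every member of [X, Y] itself.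
--     ans = max(0, Y - X + 1)
--     for i in range(2, Y + 1):
--         ans += max(0, Y // i - max((X - 1) // i, 0))
--     return ans
-- ===== Notes on version B (the rewrite author's own statement) =====
-- stated objective: faster
-- what changed: replaces A's divisor sieve (defaultdict incremented over all multiples of every i, then summed over [X,Y]) with a single loop adding, per potential divisor i, the count of its multiples in [X,Y] computed by floor division
import Mathlib
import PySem

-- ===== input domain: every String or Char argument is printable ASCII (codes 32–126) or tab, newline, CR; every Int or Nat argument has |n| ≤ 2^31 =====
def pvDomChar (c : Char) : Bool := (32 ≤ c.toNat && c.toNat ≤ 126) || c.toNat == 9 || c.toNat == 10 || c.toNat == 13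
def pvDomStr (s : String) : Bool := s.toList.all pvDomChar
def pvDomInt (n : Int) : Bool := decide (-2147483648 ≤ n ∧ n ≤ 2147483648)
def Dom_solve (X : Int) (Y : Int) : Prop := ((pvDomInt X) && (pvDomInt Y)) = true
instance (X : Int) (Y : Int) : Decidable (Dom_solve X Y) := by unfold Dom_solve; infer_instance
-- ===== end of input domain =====

-- B replaces A's divisor sieve over a defaultdict by a direct per-divisor counting
-- formula (multiples of i inside [X, Y] via floor division), dropping the inner loop.

-- ===== PORT A =====
-- literal port of A: sieve cnt[j] += 1 for every multiple j of every i in [2, Y],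
-- then sum cnt[i] over [X, Y].  The defaultdict is ported as a hash map (Python's
-- dict is one; its insertion order is never observed here): `cnt[j] += 1` is
-- insert j (getD j 1 + 1), and `cnt[i]` in the read loop is getD with default 1
-- (the lambda: 1) — the read-triggered insertion of the default is unobservable.
def solve (X : Int) (Y : Int) : Int :=
  let cnt : Std.HashMap Int Int :=
    (PySem.List.pyRange 2 (Y + 1) 1).foldl
      (fun cnt i =>
        (PySem.List.pyRange i (Y + 1) i).foldl
          (fun cnt j => cnt.insert j (cnt.getD j 1 + 1)) cnt)
      ∅
  (PySem.List.pyRange X (Y + 1) 1).foldl (fun ans i => ans + cnt.getD i 1) 0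

-- ===== PORT B =====
def solve_alt (X : Int) (Y : Int) : Int :=
  (PySem.List.pyRange 2 (Y + 1) 1).foldl
    (fun ans i =>
      ans + max 0 (PySem.Int.floordiv Y i - max (PySem.Int.floordiv (X - 1) i) 0))
    (max 0 (Y - X + 1))

-- ===== PRECONDITION & SPEC =====
def Spec_solve (X : Int) (Y : Int) (out : Int) : Prop := out = solve_alt X Y
instance (X : Int) (Y : Int) (out : Int) : Decidable (Spec_solve X Y out) := by unfold Spec_solve; infer_instance

-- ===== CLAIM (what is proved, stated in full; the proofs are below) =====
def Claim_equal_solve : Prop := ∀ (X : Int) (Y : Int), Dom_solve X Y → Spec_solve X Y (solve X Y)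

-- ===== LEMMAS AND PROOFS =====

-- the counting loop with default 1: final value = default + number of hits
lemma fold_modify_getD (l : List Int) (d : Std.HashMap Int Int) (v : Int) :
    (l.foldl (fun d x => d.insert x (d.getD x 1 + 1)) d).getD v 1
      = d.getD v 1 + l.count v := by
  induction l generalizing d with
  | nil => simp
  | cons x l ih =>
      simp only [List.foldl_cons, List.count_cons, ih, Std.HashMap.getD_insert, beq_iff_eq]
      by_cases h : x = v
      · subst h
        simp
        omega
      · have h' : v ≠ x := Ne.symm h
        simp [h]

-- a 0/1 indicator sum over R is R.count
lemma sum_indicator_count (x : Int) (R : List Int) :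
    (R.map (fun j => if x = j then (1 : Int) else 0)).sum = R.count x := by
  induction R with
  | nil => simp
  | cons r R ih =>
      simp only [List.map_cons, List.sum_cons, List.count_cons, ih]
      by_cases h : x = r
      · simp [h]
        omega
      · have h2 : r ≠ x := Ne.symm h
        simp [h, h2]

-- double-count exchange: sum over R of count(j, l) = sum over l of count(x, R)
lemma sum_count_swap (R : List Int) : ∀ (l : List Int),
    (R.map (fun j => (l.count j : Int))).sum = (l.map (fun x => (R.count x : Int))).sum := by
  intro l
  induction l with
  | nil => simp
  | cons x l ih =>
      simp only [List.map_cons, List.sum_cons, List.count_cons]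
      have hcast : (R.map (fun j => ((l.count j + if x == j then 1 else 0 : Nat) : Int))).sum
          = (R.map (fun j => ((l.count j : Int) + if x = j then (1 : Int) else 0))).sum := by
        apply congrArg
        apply List.map_congr_left
        intro j _
        push_cast
        by_cases h : x = j
        · simp [h]
        · simp [h]
      rw [hcast, PySem.List.sum_map_add_int R (fun j => (l.count j : Int))
            (fun j => if x = j then (1 : Int) else 0), ih, sum_indicator_count]
      ring

-- counting k in [0, N) with t <= k
lemma threshold_count (t : Int) : ∀ (N : Nat),
    (((List.range N).countP (fun (k : Nat) => decide (t ≤ (k : Int)))) : Int)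
      = max 0 ((N : Int) - max t 0) := by
  intro N
  induction N with
  | zero => simp
  | succ N ih =>
      have hstep : (List.range (N + 1)).countP (fun (k : Nat) => decide (t ≤ (k : Int)))
          = (List.range N).countP (fun (k : Nat) => decide (t ≤ (k : Int)))
            + (if t ≤ (N : Int) then 1 else 0) := by
        rw [List.range_succ, List.countP_append]
        simp [List.countP_cons]
      rw [hstep]
      push_cast [ih]
      split_ifs with h <;> omega

-- Int-cast countP distributes over flatMap
lemma countP_flatMap_int (f : Int → List Int) (p : Int → Bool) : ∀ (l : List Int),
    (((l.flatMap f).countP p) : Int) = (l.map (fun i => (((f i).countP p) : Int))).sum := by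
  intro l
  induction l with
  | nil => simp
  | cons x l ih => simp [List.countP_append, ih]

-- the per-divisor count of multiples inside [X, Y]
lemma per_i_count (X Y i : Int) (h2 : 2 ≤ i) (hY : i ≤ Y) :
    (((PySem.List.pyRange i (Y + 1) i).countP
        (fun x => decide (X ≤ x ∧ x < Y + 1))) : Int)
      = max 0 (PySem.Int.floordiv Y i - max (PySem.Int.floordiv (X - 1) i) 0) := by
  have hi : (0 : Int) < i := by omega
  rw [PySem.List.pyRange_of_pos _ _ hi, List.countP_map]
  have hif : (if i < Y + 1 then ((Y + 1 - i + i - 1) / i).toNat else 0)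
      = (Y / i).toNat := by
    rw [if_pos (by omega)]
    congr 1
    ring_nf
  rw [hif]
  have hq0 : 0 ≤ Y / i := Int.ediv_nonneg (by omega) (by omega)
  have hcast : (((Y / i).toNat : Int)) = Y / i := Int.toNat_of_nonneg hq0
  have hcong : List.countP ((fun x => decide (X ≤ x ∧ x < Y + 1)) ∘ fun (k : Nat) => i + i * (k : Int))
        (List.range (Y / i).toNat)
      = List.countP (fun (k : Nat) => decide (PySem.Int.floordiv (X - 1) i ≤ (k : Int)))
        (List.range (Y / i).toNat) := by
    apply List.countP_congr
    intro k hk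
    simp only [List.mem_range] at hk
    have hk' : ((k : Int)) < Y / i := by
      rw [← hcast]
      exact_mod_cast hk
    have hkq : (k : Int) + 1 ≤ Y / i := by linarith
    have hub : i + i * (k : Int) < Y + 1 := by
      have h1 : ((k : Int) + 1) * i ≤ (Y / i) * i :=
        mul_le_mul_of_nonneg_right hkq (by omega)
      have h2' : (Y / i) * i ≤ Y := Int.ediv_mul_le Y (by omega)
      nlinarith
    have hlt : PySem.Int.floordiv (X - 1) i < (k : Int) + 1 ↔ X - 1 < ((k : Int) + 1) * i :=
      PySem.Int.floordiv_lt_iff_lt_mul hi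
    have hring : ((k : Int) + 1) * i = i + i * (k : Int) := by ring
    simp only [Function.comp, decide_eq_true_eq]
    constructor
    · rintro ⟨hx, -⟩
      have hx' : X - 1 < ((k : Int) + 1) * i := by rw [hring]; linarith
      have := hlt.mpr hx'
      linarith
    · intro ht
      refine ⟨?_, hub⟩
      have hx' : X - 1 < ((k : Int) + 1) * i := hlt.mp (by linarith)
      rw [hring] at hx'
      linarith
  rw [hcong, threshold_count, hcast, PySem.Int.floordiv_eq_ediv_of_pos hi,
      show PySem.Int.floordiv Y i = Y / i from PySem.Int.floordiv_eq_ediv_of_pos hi]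

-- ===== VERDICT (by name: the statement is the Claim_ definition above) =====
theorem solve_spec : Claim_equal_solve := by
  intro X Y _
  unfold Spec_solve solve solve_alt
  simp only []
  rw [← List.foldl_flatMap
        (f := fun i => PySem.List.pyRange i (Y + 1) i)
        (g := fun (cnt : Std.HashMap Int Int) j => cnt.insert j (cnt.getD j 1 + 1))
        (l := PySem.List.pyRange 2 (Y + 1) 1)
        (init := ∅)]
  rw [PySem.List.foldl_add, PySem.List.foldl_add]
  set bigL := (PySem.List.pyRange 2 (Y + 1) 1).flatMap (fun i => PySem.List.pyRange i (Y + 1) i)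
    with hbigL
  set R := PySem.List.pyRange X (Y + 1) 1 with hR
  have hmap1 : (R.map (fun j => ((bigL.foldl (fun (cnt : Std.HashMap Int Int) j =>
        cnt.insert j (cnt.getD j 1 + 1)) ∅).getD j 1 : Int))).sum
      = (R.map (fun j => 1 + (bigL.count j : Int))).sum := by
    apply congrArg
    apply List.map_congr_left
    intro j _
    rw [fold_modify_getD, Std.HashMap.getD_empty]
  rw [hmap1, PySem.List.sum_map_add_int R (fun _ => (1 : Int)) (fun j => (bigL.count j : Int)),
      PySem.List.sum_map_const_int, sum_count_swap]
  have hRcount : ∀ x : Int, ((R.count x : Int))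
      = if (fun x => decide (X ≤ x ∧ x < Y + 1)) x = true then (1 : Int) else 0 := by
    intro x
    rw [hR, (PySem.List.nodup_pyRange_one X (Y + 1)).count]
    by_cases hm : x ∈ PySem.List.pyRange X (Y + 1) 1
    · have := (PySem.List.mem_pyRange_one).mp hm
      simp [hm, this]
    · have h2 : ¬ (X ≤ x ∧ x < Y + 1) := fun hc => hm ((PySem.List.mem_pyRange_one).mpr hc)
      simp [hm]
      omega
  have hmap2 : (bigL.map (fun x => (R.count x : Int))).sum
      = ((bigL.countP (fun x => decide (X ≤ x ∧ x < Y + 1))) : Int) := by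
    rw [List.map_congr_left (fun x _ => hRcount x),
        PySem.List.sum_map_ite_one_zero (fun x => decide (X ≤ x ∧ x < Y + 1)) bigL]
  rw [hmap2, hbigL, countP_flatMap_int]
  have hmap3 : (((PySem.List.pyRange 2 (Y + 1) 1).map (fun i =>
        (((PySem.List.pyRange i (Y + 1) i).countP
          (fun x => decide (X ≤ x ∧ x < Y + 1))) : Int)))).sum
      = ((PySem.List.pyRange 2 (Y + 1) 1).map (fun i =>
          max 0 (PySem.Int.floordiv Y i - max (PySem.Int.floordiv (X - 1) i) 0))).sum := by
    apply congrArg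
    apply List.map_congr_left
    intro i hi
    have hmem := (PySem.List.mem_pyRange_one).mp hi
    exact per_i_count X Y i (by omega) (by omega)
  rw [hmap3]
  have hlen : ((R.length : Int)) = max 0 (Y - X + 1) := by
    rw [hR, PySem.List.length_pyRange_one]
    omega
  rw [hlen]
  ring
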